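-- pv_equiv track=rewrite | github.com/joojeehwan/algorithm_genius | Programmers/64062_징검다리건너기/haeun_징검다리건너기.py | solution
-- ===== SOURCE A (Python) =====
-- def solution(stones, k):
--     start, end = 1, max(stones)
--     answer = 1
--
--     while start <= end:
--         mid = (start + end) // 2
--         zeros = 0
--
--         for stone in stones:
--             if stone - mid < 0:
--                 zeros += 1
--                 if zeros == k:
--                     break
--             else:
--                 zeros = 0
--
--         if zeros == k:
--             end = mid - 1
--         else:
--             start = mid + 1
--             answer = max(answer, mid)
--
--     return answer
-- ===== SOURCE B (Python) =====
-- def solution(stones, k):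
--     # Direct formulation: the answer is the smallest window-maximum over all
--     # length-k windows (at least 1); no window (k > len) means max(stones) caps it.
--     n = len(stones)
--     if k > n:
--         best = max(stones)
--     else:
--         best = min(max(stones[i:i + k]) for i in range(n - k + 1))
--     return max(1, best)
-- ===== Notes on version B (the rewrite author's own statement) =====
-- stated objective: simpler
-- what changed: Replaces A's binary search over candidate crossing levels (re-scanning the stones with a run counter for each probe) by the direct closed formulation: answer = max(1, min over all length-k windows of the window maximum).
-- outside the precondition, e.g. on solution([3, 1, 2], 0): A returns 1, B raises ValueError; on solution([5, 5], -1): A returns 5, B raises ValueError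
import Mathlib
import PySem

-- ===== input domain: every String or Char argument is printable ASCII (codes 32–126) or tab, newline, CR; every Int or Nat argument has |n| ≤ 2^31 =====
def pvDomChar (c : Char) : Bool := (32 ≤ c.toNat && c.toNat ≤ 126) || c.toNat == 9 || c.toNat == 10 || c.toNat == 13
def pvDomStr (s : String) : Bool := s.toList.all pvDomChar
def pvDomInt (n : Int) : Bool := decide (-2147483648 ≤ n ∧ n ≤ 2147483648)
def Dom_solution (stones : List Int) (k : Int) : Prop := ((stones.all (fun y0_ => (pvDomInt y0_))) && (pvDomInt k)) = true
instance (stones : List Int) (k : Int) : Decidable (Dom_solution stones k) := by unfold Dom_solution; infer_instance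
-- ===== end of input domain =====

-- B replaces A's binary search on the crossing level by the direct closed formulation
-- "max(1, min over k-windows of the window maximum)" (objective: simpler).

-- ===== PORT A =====
-- the body of A's inner `for stone in stones` loop (zeros counter with break-at-k, as a flagged fold state)
def aStep (mid k : Int) (st : Int × Bool) (stone : Int) : Int × Bool :=
  if st.2 then st  -- after `break`: the loop body no longer runs
  else if stone - mid < 0 then
    if st.1 + 1 = k then (st.1 + 1, true) else (st.1 + 1, false)
  else (0, false)

def aZeros (stones : List Int) (mid k : Int) : Int :=
  (stones.foldl (aStep mid k) ((0 : Int), false)).1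

-- A's `while start <= end` loop (`mid` inlined at each occurrence)
def aGo (stones : List Int) (k start end_ answer : Int) : Int :=
  if h : start ≤ end_ then
    if aZeros stones (PySem.Int.floordiv (start + end_) 2) k = k then
      aGo stones k start (PySem.Int.floordiv (start + end_) 2 - 1) answer
    else
      aGo stones k (PySem.Int.floordiv (start + end_) 2 + 1) end_
        (max answer (PySem.Int.floordiv (start + end_) 2))
  else answer
termination_by (end_ + 1 - start).toNat
decreasing_by
  · have hb := PySem.Int.floordiv_two_mid_bounds h
    omega
  · have hb := PySem.Int.floordiv_two_mid_bounds h
    omega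

def solution (stones : List Int) (k : Int) : Int :=
  aGo stones k 1 ((PySem.List.max? stones (fun y => y)).getD 0) 1

-- ===== PORT B =====
def solution_alt (stones : List Int) (k : Int) : Int :=
  -- n and best inlined (n = len(stones), best = the if/else value)
  max 1
    (if k > (stones.length : Int) then (PySem.List.max? stones (fun y => y)).getD 0
     else (PySem.List.min?
            ((PySem.List.pyRange 0 ((stones.length : Int) - k + 1) 1).map (fun i =>
              (PySem.List.max? (PySem.List.slice stones (some i) (some (i + k))) (fun y => y)).getD 0))
            (fun y => y)).getD 0)

-- ===== PRECONDITION & SPEC =====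
-- Pre_ excludes empty stones (A raises ValueError at `max(stones)`) and k ≤ 0, on which A's
-- bisection tests a degenerate "run of k ≤ 0 low stones" predicate and its returned value is an
-- accident of the bisection order, while B's min-of-window-maxima raises ValueError there.
def Pre_solution (stones : List Int) (k : Int) : Prop := stones ≠ [] ∧ 1 ≤ k
instance (stones : List Int) (k : Int) : Decidable (Pre_solution stones k) := by
  unfold Pre_solution; infer_instance
def pvWitness_solution : List Int × Int := ([2, 1, 3], 2)

def Spec_solution (stones : List Int) (k : Int) (out : Int) : Prop := out = solution_alt stones k
instance (stones : List Int) (k : Int) (out : Int) : Decidable (Spec_solution stones k out) := by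
  unfold Spec_solution; infer_instance

-- ===== CLAIM (what is proved, stated in full; the proofs are below) =====
def Claim_equal_solution : Prop := ∀ (stones : List Int) (k : Int), Dom_solution stones k → Pre_solution stones k → Spec_solution stones k (solution stones k)

-- ===== LEMMAS AND PROOFS =====

-- a run of K consecutive stones all below m, starting at index i
def HasRun (stones : List Int) (K : Nat) (m : Int) : Prop :=
  ∃ i : Nat, i + K ≤ stones.length ∧ ∀ x ∈ (stones.drop i).take K, x < m

-- the first c elements exist and are all below m
def HeadLow (l : List Int) (c : Nat) (m : Int) : Prop :=
  c ≤ l.length ∧ ∀ x ∈ l.take c, x < m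

theorem headLow_mono {l : List Int} {c c' : Nat} {m : Int} (h : c' ≤ c) (hl : HeadLow l c m) :
    HeadLow l c' m := by
  obtain ⟨h1, h2⟩ := hl
  refine ⟨le_trans h h1, fun x hx => h2 x ?_⟩
  have : l.take c' = (l.take c).take c' := by rw [List.take_take, min_eq_left h]
  rw [this] at hx
  exact List.mem_of_mem_take hx

theorem aFold_frozen (m k : Int) (l : List Int) (s : Int) :
    l.foldl (aStep m k) (s, true) = (s, true) := by
  induction l with
  | nil => rfl
  | cons x t ih => simpa [aStep] using ih

theorem headLow_cons_low {x m : Int} {t : List Int} {c : Nat} (hx : x < m) :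
    HeadLow (x :: t) (c + 1) m ↔ HeadLow t c m := by
  unfold HeadLow
  simp only [List.take_succ_cons, List.length_cons, List.mem_cons]
  constructor
  · rintro ⟨h1, h2⟩
    exact ⟨by omega, fun y hy => h2 y (Or.inr hy)⟩
  · rintro ⟨h1, h2⟩
    refine ⟨by omega, fun y hy => ?_⟩
    rcases hy with rfl | hy
    · exact hx
    · exact h2 y hy

theorem headLow_cons_not_low {x m : Int} {t : List Int} {c : Nat} (hx : ¬ x < m) (hc : 1 ≤ c) :
    ¬ HeadLow (x :: t) c m := by
  rintro ⟨h1, h2⟩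
  apply hx
  apply h2
  obtain ⟨c', rfl⟩ : ∃ c', c = c' + 1 := ⟨c - 1, by omega⟩
  simp [List.take_succ_cons]

theorem hasRun_cons {x m : Int} {t : List Int} {K : Nat} :
    HasRun (x :: t) K m ↔ HeadLow (x :: t) K m ∨ HasRun t K m := by
  unfold HasRun HeadLow
  constructor
  · rintro ⟨i, h1, h2⟩
    cases i with
    | zero => exact Or.inl ⟨by simpa using h1, by simpa using h2⟩
    | succ j =>
      refine Or.inr ⟨j, ?_, ?_⟩
      · simp only [List.length_cons] at h1; omega
      · simpa using h2
  · rintro (⟨h1, h2⟩ | ⟨j, h1, h2⟩)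
    · exact ⟨0, by simpa using h1, by simpa using h2⟩
    · exact ⟨j + 1, by simp only [List.length_cons]; omega, by simpa using h2⟩

theorem headLow_hasRun {l : List Int} {K : Nat} {m : Int} (h : HeadLow l K m) :
    HasRun l K m := ⟨0, by simpa using h.1, by simpa using h.2⟩

theorem aFold_spec (m k : Int) (hk : 1 ≤ k) :
    ∀ (l : List Int) (z : Int), 0 ≤ z → z < k →
      (l.foldl (aStep m k) (z, false) = (k, true) ∨
        (∃ z', l.foldl (aStep m k) (z, false) = (z', false) ∧ 0 ≤ z' ∧ z' < k)) ∧
      ((l.foldl (aStep m k) (z, false)).2 = true ↔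
        HeadLow l (k.toNat - z.toNat) m ∨ HasRun l k.toNat m) := by
  intro l
  induction l with
  | nil =>
    intro z hz0 hzk
    refine ⟨Or.inr ⟨z, rfl, hz0, hzk⟩, ?_⟩
    simp only [List.foldl_nil]
    constructor
    · intro h; exact absurd h (by simp)
    · rintro (⟨h1, _⟩ | ⟨i, h1, _⟩)
      · simp only [List.length_nil, Nat.le_zero] at h1; omega
      · simp only [List.length_nil] at h1; omega
  | cons x t ih =>
    intro z hz0 hzk
    have hc : k.toNat - z.toNat ≥ 1 := by omega
    simp only [List.foldl_cons]
    by_cases hx : x - m < 0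
    · have hxm : x < m := by omega
      by_cases hz1 : z + 1 = k
      · rw [show aStep m k (z, false) x = (k, true) by simp [aStep, hx, hz1]]
        rw [aFold_frozen]
        refine ⟨Or.inl rfl, ?_⟩
        simp only [true_iff]
        left
        have : k.toNat - z.toNat = 1 := by omega
        rw [this]
        refine ⟨by simp, fun y hy => ?_⟩
        simp only [List.take_succ_cons, List.take_zero, List.mem_singleton] at hy
        subst hy; exact hxm
      · have hz1' : z + 1 < k := by omega
        rw [show aStep m k (z, false) x = (z + 1, false) by simp [aStep, hx, hz1]]
        obtain ⟨sh, hiff⟩ := ih (z + 1) (by omega) hz1'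
        refine ⟨sh, ?_⟩
        rw [hiff]
        have hcc : k.toNat - z.toNat = (k.toNat - (z + 1).toNat) + 1 := by omega
        constructor
        · rintro (h | h)
          · left; rw [hcc]; exact (headLow_cons_low hxm).mpr h
          · right; exact hasRun_cons.mpr (Or.inr h)
        · rintro (h | h)
          · left; rw [hcc] at h; exact (headLow_cons_low hxm).mp h
          · rcases hasRun_cons.mp h with h' | h'
            · left
              apply headLow_mono (c := k.toNat - 1) (by omega)
              have hK1 : k.toNat = (k.toNat - 1) + 1 := by omega
              rw [hK1] at h'
              exact (headLow_cons_low hxm).mp h'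
            · right; exact h'
    · rw [show aStep m k (z, false) x = (0, false) by simp [aStep, hx]]
      obtain ⟨sh, hiff⟩ := ih 0 le_rfl (by omega)
      refine ⟨sh, ?_⟩
      rw [hiff]
      simp only [Int.toNat_zero, Nat.sub_zero]
      constructor
      · rintro (h | h)
        · right; exact hasRun_cons.mpr (Or.inr (headLow_hasRun h))
        · right; exact hasRun_cons.mpr (Or.inr h)
      · rintro (h | h)
        · exact absurd h (headLow_cons_not_low (by omega) (by omega))
        · rcases hasRun_cons.mp h with h' | h'
          · exact absurd h' (headLow_cons_not_low (by omega) (by omega))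
          · right; exact h'

theorem aZeros_eq_iff (stones : List Int) (m k : Int) (hk : 1 ≤ k) :
    aZeros stones m k = k ↔ HasRun stones k.toNat m := by
  obtain ⟨sh, hiff⟩ := aFold_spec m k hk stones 0 le_rfl (by omega)
  simp only [Int.toNat_zero, Nat.sub_zero] at hiff
  unfold aZeros
  constructor
  · intro h
    rcases sh with heq | ⟨z', heq, _, hz'⟩
    · rcases hiff.mp (by rw [heq]) with h' | h'
      · exact headLow_hasRun h'
      · exact h'
    · rw [heq] at h; simp at h; omega
  · intro h
    rcases sh with heq | ⟨z', heq, _, hz'⟩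
    · rw [heq]
    · exfalso
      have : (stones.foldl (aStep m k) ((0:Int), false)).2 = true := hiff.mpr (Or.inr h)
      rw [heq] at this
      simp at this

-- the binary search of A, characterised by a threshold T' (proved by recursion on the interval)
theorem aGo_eq (stones : List Int) (k M T' : Int) (h0 : 0 ≤ T') (hTM : T' ≤ M)
    (hgood : ∀ m, 1 ≤ m → m ≤ T' → ¬ aZeros stones m k = k)
    (hbad : ∀ m, T' < m → m ≤ M → aZeros stones m k = k)
    (start end_ answer : Int) (h1 : 1 ≤ start) (h2 : start ≤ T' + 1) (h3 : T' ≤ end_)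
    (h4 : end_ ≤ M) (h5 : answer = max 1 (start - 1)) :
    aGo stones k start end_ answer = max 1 T' := by
  rw [aGo]
  by_cases hse : start ≤ end_
  · rw [dif_pos hse]
    obtain ⟨hm1, hm2⟩ := PySem.Int.floordiv_two_mid_bounds hse
    by_cases hz : aZeros stones (PySem.Int.floordiv (start + end_) 2) k = k
    · rw [if_pos hz]
      have hTm : T' < PySem.Int.floordiv (start + end_) 2 := by
        by_contra hcon
        push Not at hcon
        exact hgood _ (by omega) hcon hz
      exact aGo_eq stones k M T' h0 hTM hgood hbad start
        (PySem.Int.floordiv (start + end_) 2 - 1) answer h1 h2 (by omega) (by omega) h5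
    · rw [if_neg hz]
      have hTm : PySem.Int.floordiv (start + end_) 2 ≤ T' := by
        by_contra hcon
        push Not at hcon
        exact hz (hbad _ hcon (by omega))
      exact aGo_eq stones k M T' h0 hTM hgood hbad
        (PySem.Int.floordiv (start + end_) 2 + 1) end_
        (max answer (PySem.Int.floordiv (start + end_) 2)) (by omega) (by omega) h3 h4 (by omega)
  · rw [dif_neg hse]
    omega
termination_by (end_ + 1 - start).toNat
decreasing_by
  · omega
  · omega

-- max(w) and min(w) of a nonempty list, as B computes them
theorem max_getD_props (l : List Int) (h : l ≠ []) :
    (PySem.List.max? l (fun y => y)).getD 0 ∈ l ∧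
      ∀ x ∈ l, x ≤ (PySem.List.max? l (fun y => y)).getD 0 := by
  cases hm : PySem.List.max? l (fun y => y) with
  | none => exact absurd ((PySem.List.max?_eq_none_iff l (fun y => y)).mp hm) h
  | some w =>
    simp only [Option.getD_some]
    exact ⟨PySem.List.max?_mem hm, PySem.List.max?_isMax hm⟩

theorem min_getD_props (l : List Int) (h : l ≠ []) :
    (PySem.List.min? l (fun y => y)).getD 0 ∈ l ∧
      ∀ x ∈ l, (PySem.List.min? l (fun y => y)).getD 0 ≤ x := by
  cases hm : PySem.List.min? l (fun y => y) with
  | none => exact absurd ((PySem.List.min?_eq_none_iff l (fun y => y)).mp hm) h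
  | some w =>
    simp only [Option.getD_some]
    exact ⟨PySem.List.min?_mem hm, PySem.List.min?_isMin hm⟩

-- the maximum of the window of length K starting at j, as B computes it
def winMax (stones : List Int) (K j : Nat) : Int :=
  (PySem.List.max? ((stones.drop j).take K) (fun y => y)).getD 0

-- B's comprehension over `range(n - k + 1)` is the list of the winMax values
theorem blist_eq (stones : List Int) (k : Int) (hk : 0 ≤ k) :
    (PySem.List.pyRange 0 ((stones.length : Int) - k + 1) 1).map (fun i =>
        (PySem.List.max? (PySem.List.slice stones (some i) (some (i + k))) (fun y => y)).getD 0)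
      = (List.range ((stones.length : Int) - k + 1).toNat).map (fun j => winMax stones k.toNat j) := by
  rw [PySem.List.pyRange_one, List.map_map]
  simp only [sub_zero]
  apply List.map_congr_left
  intro j _
  have hkk : ((k.toNat : Nat) : Int) = k := Int.toNat_of_nonneg hk
  simp only [Function.comp_apply, zero_add]
  rw [← hkk, PySem.List.slice_natCast_add]
  rfl

theorem window_ne_nil (stones : List Int) (K j : Nat) (hK : 1 ≤ K)
    (hj : j + K ≤ stones.length) : (stones.drop j).take K ≠ [] := by
  have : ((stones.drop j).take K).length = K := by
    simp only [List.length_take, List.length_drop]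
    omega
  intro hnil
  rw [hnil] at this
  simp at this
  omega

theorem mem_window_mem (stones : List Int) (K j : Nat) {x : Int}
    (hx : x ∈ (stones.drop j).take K) : x ∈ stones :=
  List.mem_of_mem_drop (List.mem_of_mem_take hx)

-- ===== VERDICT (by name: the statement is the Claim_ definition above) =====
theorem solution_spec : Claim_equal_solution := by
  intro stones k _ hpre
  obtain ⟨hne, hk⟩ := hpre
  unfold Spec_solution solution solution_alt
  -- M = max(stones), with its two properties
  obtain ⟨hMmem, hMub⟩ := max_getD_props stones hne
  set M : Int := (PySem.List.max? stones (fun y => y)).getD 0 with hM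
  set n : Nat := stones.length with hn
  have hn1 : 1 ≤ n := by
    cases stones with
    | nil => exact absurd rfl hne
    | cons a t => simp [hn]
  by_cases hkn : k > (n : Int)
  · -- no full window: A's run predicate is always false, B returns max(1, M)
    rw [if_pos hkn]
    have hnorun : ∀ m, ¬ aZeros stones m k = k := by
      intro m hzz
      obtain ⟨i, hik, _⟩ := (aZeros_eq_iff stones m k hk).mp hzz
      omega
    by_cases hM1 : 1 ≤ M
    · rw [aGo_eq stones k M M (by omega) le_rfl (fun m _ _ => hnorun m)
        (fun m hm1 hm2 => absurd hm1 (by omega)) 1 M 1 le_rfl (by omega) (by omega) le_rfl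
        (by omega)]
    · rw [aGo]
      rw [dif_neg (by omega)]
      omega
  · -- k ≤ n: B returns max(1, W) with W the least window maximum
    rw [if_neg hkn]
    rw [blist_eq stones k (by omega)]
    set K : Nat := k.toNat with hK
    have hKk : (K : Int) = k := Int.toNat_of_nonneg (by omega)
    have hK1 : 1 ≤ K := by omega
    have hKn : K ≤ n := by omega
    set cnt : Nat := ((n : Int) - k + 1).toNat with hcnt
    have hcnt' : cnt = n - K + 1 := by omega
    have hcnt1 : 1 ≤ cnt := by omega
    -- the list of window maxima is nonempty
    have hlne : (List.range cnt).map (fun j => winMax stones K j) ≠ [] := by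
      simp only [ne_eq, List.map_eq_nil_iff, List.range_eq_nil]
      omega
    obtain ⟨hWmem, hWlb⟩ := min_getD_props _ hlne
    set W : Int := (PySem.List.min?
      ((List.range cnt).map (fun j => winMax stones K j)) (fun y => y)).getD 0 with hW
    -- W is one of the window maxima, and a lower bound on all of them
    obtain ⟨j0, hj0, hj0W⟩ := by
      simpa only [List.mem_map, List.mem_range] using hWmem
    have hwin : ∀ j, j < cnt → winMax stones K j ∈ (stones.drop j).take K ∧
        ∀ x ∈ (stones.drop j).take K, x ≤ winMax stones K j := by
      intro j hj
      exact max_getD_props _ (window_ne_nil stones K j hK1 (by omega))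
    have hWlb' : ∀ j, j < cnt → W ≤ winMax stones K j := by
      intro j hj
      exact hWlb _ (List.mem_map_of_mem (by simpa using hj))
    -- the run predicate is exactly "W < m"
    have hchar : ∀ m, aZeros stones m k = k ↔ W < m := by
      intro m
      rw [aZeros_eq_iff stones m k hk]
      constructor
      · rintro ⟨i, hik, hall⟩
        have hi : i < cnt := by omega
        have := hall _ (hwin i hi).1
        have := hWlb' i hi
        omega
      · intro hWm
        refine ⟨j0, by omega, fun x hx => ?_⟩
        have := (hwin j0 hj0).2 x hx
        omega
    have hWM : W ≤ M := by
      rw [← hj0W] at *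
      exact hMub _ (mem_window_mem stones K j0 (hwin j0 hj0).1)
    by_cases hM1 : 1 ≤ M
    · rw [aGo_eq stones k M (max 0 (min M W)) (by omega) (by omega)
        (fun m hm1 hm2 => by rw [hchar]; omega)
        (fun m hm1 hm2 => by rw [hchar]; omega)
        1 M 1 le_rfl (by omega) (by omega) le_rfl (by omega)]
      omega
    · rw [aGo]
      rw [dif_neg (by omega)]
      omega
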